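-- pv_equiv track=rewrite | github.com/tykisgod/quick-question | scripts/qq-context-capsule.py | trim_markdown
-- ===== SOURCE A (Python) =====
-- def trim_markdown(lines: list[str], max_chars: int) -> str:
--     if max_chars <= 0:
--         return ""
--
--     output: list[str] = []
--     current_length = 0
--     trimmed = False
--     for line in lines:
--         addition = line if not output else f"\n{line}"
--         if current_length + len(addition) > max_chars:
--             trimmed = True
--             break
--         output.append(line)
--         current_length += len(addition)
--
--     if trimmed:
--         suffix = "\n- Note: capsule trimmed to fit limit."
--         text = "\n".join(output)
--         if len(text) + len(suffix) <= max_chars: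
--             return text + suffix
--         return text[: max(0, max_chars - 3)].rstrip() + "..."
--     return "\n".join(output)
-- ===== SOURCE B (Python) =====
-- def trim_markdown(lines: list[str], max_chars: int) -> str:
--     if max_chars <= 0:
--         return ""
--
--     # Shrink from the full document: drop trailing lines while the joined text
--     # overflows (correct because the joined length is nondecreasing in the
--     # number of leading lines kept).
--     kept = list(lines)
--     total = len("\n".join(kept))
--     while kept and total > max_chars:
--         last = kept.pop()
--         total -= len(last) + (1 if kept else 0)
--
--     if len(kept) == len(lines):
--         return "\n".join(kept)
--
--     suffix = "\n- Note: capsule trimmed to fit limit."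
--     text = "\n".join(kept)
--     if len(text) + len(suffix) <= max_chars:
--         return text + suffix
--     return text[: max(0, max_chars - 3)].rstrip() + "..."
-- ===== Notes on version B (the rewrite author's own statement) =====
-- stated objective: alternative
-- what changed: B inverts A's strategy: instead of growing a prefix line by line and breaking on overflow, it joins the full line list once and repeatedly drops the last line (decrementing the tracked total) while the joined text exceeds the limit, then applies the same suffix/'...' fallback.
import Mathlib
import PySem

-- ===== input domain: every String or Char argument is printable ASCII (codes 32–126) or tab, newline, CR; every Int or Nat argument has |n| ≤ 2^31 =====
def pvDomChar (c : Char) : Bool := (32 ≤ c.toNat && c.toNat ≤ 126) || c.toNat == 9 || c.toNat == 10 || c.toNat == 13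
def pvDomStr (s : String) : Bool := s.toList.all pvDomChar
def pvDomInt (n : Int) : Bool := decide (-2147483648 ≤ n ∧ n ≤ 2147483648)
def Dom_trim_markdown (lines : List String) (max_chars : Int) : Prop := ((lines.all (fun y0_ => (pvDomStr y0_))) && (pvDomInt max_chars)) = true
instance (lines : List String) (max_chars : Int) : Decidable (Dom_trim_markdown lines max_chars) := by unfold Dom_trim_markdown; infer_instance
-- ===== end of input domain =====

-- B replaces A's grow-and-break accumulation with the opposite strategy: join the full
-- document once, then drop trailing lines (updating the total) while the joined text
-- overflows (alternative decomposition, not faster); same suffix/'...' fallback.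


-- ===== PORT A =====
-- A's for-loop with break: recursion over the remaining lines carrying (output, current_length);
-- returns (output, trimmed)
def trimLoopA (max_chars : Int) : List String → List String → Int → List String × Bool
  | [], output, _ => (output, false)
  | line :: rest, output, cur =>
      let addition := if output.isEmpty then line else "\n" ++ line
      if cur + PySem.Str.len addition > max_chars then (output, true)
      else trimLoopA max_chars rest (output ++ [line]) (cur + PySem.Str.len addition)

def trim_markdown (lines : List String) (max_chars : Int) : String :=
  if max_chars ≤ 0 then ""
  else
    let r := trimLoopA max_chars lines [] 0
    if r.2 then
      let suffix := "\n- Note: capsule trimmed to fit limit."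
      let text := PySem.Str.join "\n" r.1
      if PySem.Str.len text + PySem.Str.len suffix ≤ max_chars then text ++ suffix
      else PySem.Str.rstrip (PySem.Str.slice text none (some (max 0 (max_chars - 3)))) ++ "..."
    else PySem.Str.join "\n" r.1

-- ===== PORT B =====
-- Source B's `while kept and total > max_chars: last = kept.pop(); total -= len(last) + (1 if kept else 0)`
def shrinkB (max_chars : Int) : List String → Int → List String
  | [], _ => []
  | l :: rest, total =>
      if total > max_chars then
        shrinkB max_chars (l :: rest).dropLast
          (total - PySem.Str.len ((l :: rest).getLast (by simp))
                 - (if (l :: rest).dropLast.isEmpty then 0 else 1))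
      else l :: rest
termination_by kept => kept.length
decreasing_by simp [List.length_dropLast]

def trim_markdown_alt (lines : List String) (max_chars : Int) : String :=
  if max_chars ≤ 0 then ""
  else
    let kept := shrinkB max_chars lines (PySem.Str.len (PySem.Str.join "\n" lines))
    if kept.length = lines.length then PySem.Str.join "\n" kept
    else
      let suffix := "\n- Note: capsule trimmed to fit limit."
      let text := PySem.Str.join "\n" kept
      if PySem.Str.len text + PySem.Str.len suffix ≤ max_chars then text ++ suffix
      else PySem.Str.rstrip (PySem.Str.slice text none (some (max 0 (max_chars - 3)))) ++ "..."

-- ===== PRECONDITION & SPEC =====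
def Spec_trim_markdown (lines : List String) (max_chars : Int) (out : String) : Prop := out = trim_markdown_alt lines max_chars
instance (lines : List String) (max_chars : Int) (out : String) : Decidable (Spec_trim_markdown lines max_chars out) := by unfold Spec_trim_markdown; infer_instance

-- ===== CLAIM (what is proved, stated in full; the proofs are below) =====
def Claim_equal_trim_markdown : Prop := ∀ (lines : List String) (max_chars : Int), Dom_trim_markdown lines max_chars → Spec_trim_markdown lines max_chars (trim_markdown lines max_chars)

-- ===== LEMMAS AND PROOFS =====

/-- Proof-side view of A's greedy prefix: number of leading lines whose joined
length (running total `t`, `first` = no line taken yet) stays ≤ `max_chars`. -/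
def fitCount (max_chars : Int) : List String → Bool → Int → Nat
  | [], _, _ => 0
  | l :: rest, first, t =>
      let t' := t + PySem.Str.len l + (if first then 0 else 1)
      if t' ≤ max_chars then fitCount max_chars rest false t' + 1 else 0

/-- The total joined length contributed by the lines of `l` when the join is in
state `first` (= no line emitted yet): `len + 1` per line, the leading `1`
dropped when `first`. -/
def addSum : Bool → List String → Int
  | _, [] => 0
  | first, a :: rest => (if first then 0 else 1) + PySem.Str.len a + addSum false rest

theorem str_len_nonneg (s : String) : 0 ≤ PySem.Str.len s := by
  rw [PySem.Str.len_eq]; exact Int.natCast_nonneg _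

theorem addSum_nonneg : ∀ (first : Bool) (l : List String), 0 ≤ addSum first l := by
  intro first l
  induction l generalizing first with
  | nil => simp [addSum]
  | cons a rest ih =>
      have := str_len_nonneg a
      have := ih false
      simp only [addSum]
      split <;> linarith

theorem joinLen_eq_addSum : ∀ (l : List String),
    PySem.Str.len (PySem.Str.join "\n" l) = addSum true l := by
  have key : ∀ (l : List String), l ≠ [] →
      1 + PySem.Str.len (PySem.Str.join "\n" l) = addSum false l := by
    intro l
    induction l with
    | nil => intro h; exact absurd rfl h
    | cons a rest ih =>
        intro _
        cases rest with
        | nil =>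
            simp [addSum, PySem.Str.len_eq, PySem.Str.toList_join, PySem.Chars.join_singleton]
        | cons b r =>
            rw [show addSum false (a :: b :: r)
                  = 1 + PySem.Str.len a + addSum false (b :: r) from rfl, ← ih (by simp)]
            simp [PySem.Str.len_eq, PySem.Str.toList_join, PySem.Chars.join_cons_cons]
            ring
  intro l
  cases l with
  | nil =>
      simp [addSum, PySem.Str.len_eq, PySem.Str.toList_join, PySem.Chars.join_nil]
  | cons a rest =>
      cases rest with
      | nil => simp [addSum, PySem.Str.len_eq, PySem.Str.toList_join, PySem.Chars.join_singleton]
      | cons b r =>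
          rw [show addSum true (a :: b :: r)
                = 0 + PySem.Str.len a + addSum false (b :: r) from rfl, ← key (b :: r) (by simp)]
          simp [PySem.Str.len_eq, PySem.Str.toList_join, PySem.Chars.join_cons_cons]
          ring

theorem fitCount_le (max_chars : Int) :
    ∀ (rest : List String) (first : Bool) (t : Int),
      fitCount max_chars rest first t ≤ rest.length := by
  intro rest
  induction rest with
  | nil => intro _ _; simp [fitCount]
  | cons l rest ih =>
      intro first t
      simp only [fitCount, List.length_cons]
      by_cases h : t + PySem.Str.len l + (if first = true then (0:Int) else 1) ≤ max_chars
      · rw [if_pos h]; exact Nat.succ_le_succ (ih false _)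
      · rw [if_neg h]; exact Nat.zero_le _

theorem fitCount_take_min (max_chars : Int) :
    ∀ (l : List String) (m : Nat) (first : Bool) (t : Int),
      fitCount max_chars (l.take m) first t = min (fitCount max_chars l first t) m := by
  intro l
  induction l with
  | nil => intro m first t; simp [fitCount]
  | cons a rest ih =>
      intro m first t
      cases m with
      | zero => simp [fitCount]
      | succ m =>
          simp only [List.take_succ_cons, fitCount]
          by_cases h : t + PySem.Str.len a + (if first = true then (0:Int) else 1) ≤ max_chars
          · rw [if_pos h, if_pos h, ih]
            omega
          · rw [if_neg h, if_neg h]; simp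

theorem fc_fit (max_chars : Int) :
    ∀ (l : List String) (first : Bool) (t : Int), t ≤ max_chars →
      t + addSum first (l.take (fitCount max_chars l first t)) ≤ max_chars := by
  intro l
  induction l with
  | nil => intro first t ht; simpa [fitCount, addSum] using ht
  | cons a rest ih =>
      intro first t ht
      simp only [fitCount]
      by_cases h : t + PySem.Str.len a + (if first = true then (0:Int) else 1) ≤ max_chars
      · rw [if_pos h]
        rw [List.take_succ_cons]
        have hih := ih false _ h
        simp only [addSum]
        by_cases hf : first = true <;> simp [hf] at h hih ⊢ <;> linarith
      · rw [if_neg h]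
        simpa [addSum] using ht

theorem fc_full (max_chars : Int) :
    ∀ (l : List String) (first : Bool) (t : Int),
      t + addSum first l ≤ max_chars → fitCount max_chars l first t = l.length := by
  intro l
  induction l with
  | nil => intro _ _ _; simp [fitCount]
  | cons a rest ih =>
      intro first t hle
      simp only [addSum] at hle
      have hrest := addSum_nonneg false rest
      have h : t + PySem.Str.len a + (if first = true then (0:Int) else 1) ≤ max_chars := by
        split <;> split at hle <;> simp_all <;> linarith
      simp only [fitCount, List.length_cons]
      rw [if_pos h, ih false _ (by split at h <;> split at hle <;> simp_all <;> linarith)]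

theorem lenJoin_cons_ne (a : String) (m : List String) (h : m ≠ []) :
    PySem.Str.len (PySem.Str.join "\n" (a :: m))
      = PySem.Str.len a + 1 + PySem.Str.len (PySem.Str.join "\n" m) := by
  cases m with
  | nil => exact absurd rfl h
  | cons b r =>
      simp [PySem.Str.len_eq, PySem.Str.toList_join, PySem.Chars.join_cons_cons]
      ring

theorem lenJoin_append_singleton (x : String) :
    ∀ (d : List String),
      PySem.Str.len (PySem.Str.join "\n" (d ++ [x]))
        = PySem.Str.len (PySem.Str.join "\n" d) + PySem.Str.len x
            + (if d.isEmpty then 0 else 1) := by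
  intro d
  induction d with
  | nil =>
      simp [PySem.Str.len_eq, PySem.Str.toList_join, PySem.Chars.join_singleton,
        PySem.Chars.join_nil]
  | cons a r ih =>
      rw [List.cons_append, lenJoin_cons_ne a (r ++ [x]) (by simp), ih]
      cases r with
      | nil =>
          simp [PySem.Str.len_eq, PySem.Str.toList_join, PySem.Chars.join_singleton,
            PySem.Chars.join_nil]
          ring
      | cons b t =>
          rw [lenJoin_cons_ne a (b :: t) (by simp)]
          simp
          ring

/-- B's shrink-from-the-end loop (total kept in sync with the joined length)
lands exactly on A's greedy prefix. -/
theorem shrinkB_eq (max_chars : Int) (hpos : 0 < max_chars) :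
    ∀ (n : Nat) (l : List String), l.length ≤ n →
      shrinkB max_chars l (PySem.Str.len (PySem.Str.join "\n" l))
        = l.take (fitCount max_chars l true 0) := by
  intro n
  induction n with
  | zero =>
      intro l hl
      have : l = [] := List.length_eq_zero_iff.mp (Nat.le_zero.mp hl)
      subst this; simp [shrinkB]
  | succ n ih =>
      intro l hl
      cases l with
      | nil => simp [shrinkB]
      | cons a rest =>
          have hne : (a :: rest : List String) ≠ [] := by simp
          by_cases hover : PySem.Str.len (PySem.Str.join "\n" (a :: rest)) > max_chars
          · -- overflow: pop the last line (updating the total) and recurse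
            obtain ⟨d, x, hdx⟩ : ∃ d x, (a :: rest : List String) = d ++ [x] :=
              ⟨_, _, (List.dropLast_append_getLast hne).symm⟩
            have hflt : fitCount max_chars (a :: rest) true 0 < (a :: rest).length := by
              rcases Nat.lt_or_ge (fitCount max_chars (a :: rest) true 0)
                  (a :: rest).length with h | h
              · exact h
              · exfalso
                have heq : fitCount max_chars (a :: rest) true 0 = (a :: rest).length :=
                  Nat.le_antisymm (fitCount_le max_chars (a :: rest) true 0) h
                have := fc_fit max_chars (a :: rest) true 0 (le_of_lt hpos)
                rw [heq, List.take_length, ← joinLen_eq_addSum] at this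
                linarith
            rw [shrinkB, if_pos hover]
            simp only [hdx, List.dropLast_concat, List.getLast_concat]
            rw [show PySem.Str.len (PySem.Str.join "\n" (d ++ [x])) - PySem.Str.len x
                  - (if d.isEmpty then 0 else 1)
                  = PySem.Str.len (PySem.Str.join "\n" d) from by
                rw [lenJoin_append_singleton]; ring]
            have hdlen : d.length ≤ n := by
              rw [hdx] at hl; simp at hl; omega
            have hfle : fitCount max_chars (d ++ [x]) true 0 ≤ d.length := by
              rw [hdx] at hflt; simp at hflt; omega
            have hfd : fitCount max_chars d true 0 = fitCount max_chars (d ++ [x]) true 0 := by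
              have h1 := fitCount_take_min max_chars (d ++ [x]) d.length true 0
              rw [List.take_left] at h1
              omega
            rw [ih d hdlen, hfd, List.take_append_of_le_length hfle]
          · -- fits: keep everything
            rw [shrinkB, if_neg hover]
            have hfull : fitCount max_chars (a :: rest) true 0 = (a :: rest).length := by
              apply fc_full
              rw [← joinLen_eq_addSum]
              simpa using le_of_not_gt hover
            rw [hfull, List.take_length]

theorem trimLoopA_eq (max_chars : Int) :
    ∀ (rest pre : List String) (t : Int),
      trimLoopA max_chars rest pre t
        = (pre ++ rest.take (fitCount max_chars rest pre.isEmpty t),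
           decide (fitCount max_chars rest pre.isEmpty t < rest.length)) := by
  intro rest
  induction rest with
  | nil => intro pre t; simp [trimLoopA, fitCount]
  | cons l rest ih =>
      intro pre t
      have hadd : t + PySem.Str.len (if pre.isEmpty then l else "\n" ++ l)
          = t + PySem.Str.len l + (if pre.isEmpty = true then (0:Int) else 1) := by
        by_cases h : pre.isEmpty = true
        · rw [if_pos h, if_pos h]; ring
        · rw [if_neg h, if_neg h, PySem.Str.len_append,
              show PySem.Str.len "\n" = 1 from rfl]
          ring
      simp only [trimLoopA, fitCount, List.length_cons]
      rw [hadd]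
      by_cases h : t + PySem.Str.len l + (if pre.isEmpty = true then (0:Int) else 1) ≤ max_chars
      · rw [if_neg (not_lt.mpr h), ih]
        have hne : (pre ++ [l]).isEmpty = false := by simp
        simp only [hne, if_pos h, List.take_succ_cons, List.append_assoc,
          List.singleton_append, Nat.add_lt_add_iff_right]
      · rw [if_pos (not_le.mp h)]
        simp only [if_neg h, List.take_zero, List.append_nil]
        simp

-- ===== VERDICT (by name: the statement is the Claim_ definition above) =====
theorem trim_markdown_spec : Claim_equal_trim_markdown := by
  intro lines max_chars _
  unfold Spec_trim_markdown trim_markdown trim_markdown_alt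
  by_cases h0 : max_chars ≤ 0
  · rw [if_pos h0, if_pos h0]
  · rw [if_neg h0, if_neg h0]
    have hpos : 0 < max_chars := lt_of_not_ge h0
    have hb : shrinkB max_chars lines (PySem.Str.len (PySem.Str.join "\n" lines))
        = lines.take (fitCount max_chars lines true 0) :=
      shrinkB_eq max_chars hpos lines.length lines le_rfl
    have ha : trimLoopA max_chars lines [] 0
        = (lines.take (fitCount max_chars lines true 0),
           decide (fitCount max_chars lines true 0 < lines.length)) := by
      rw [trimLoopA_eq max_chars lines [] 0]
      simp [List.isEmpty_nil]
    have hfle := fitCount_le max_chars lines true 0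
    simp only [ha, hb, List.length_take]
    by_cases hl : fitCount max_chars lines true 0 = lines.length
    · simp [hl]
    · have hlt : fitCount max_chars lines true 0 < lines.length := by omega
      simp [Nat.min_eq_left hfle, hl, hlt]
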